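-- pv_equiv track=rewrite | github.com/whale0112/FirstWeb | 05/문제1.py | solution
-- ===== SOURCE A (Python) =====
-- def solution(shirt_size):
--     answer = [0] * 6 #[0, 0, 0, 0, 0, 0]
--     for ss in shirt_size:
--         if ss == 'XS':
--             answer[0] += 1
--         elif ss == 'S':
--             answer[1] += 1
--         elif ss == 'M':
--             answer[2] += 1
--         elif ss == 'L':
--             answer[3] += 1
--         elif ss == 'XL':
--             answer[4] += 1
--         else:
--             answer[5] += 1
--
--     return answer
-- ===== SOURCE B (Python) =====
-- def solution(shirt_size):
--     known = ['XS', 'S', 'M', 'L', 'XL']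
--     answer = [shirt_size.count(k) for k in known]
--     answer.append(len(shirt_size) - sum(answer))
--     return answer
-- ===== Notes on version B (the rewrite author's own statement) =====
-- stated objective: simpler
-- what changed: Replaces the per-element if-elif chain mutating a 6-slot array with a count-then-assemble shape: five list.count passes build the known buckets and the 'other' bucket is the residual len minus their sum.
import Mathlib
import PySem

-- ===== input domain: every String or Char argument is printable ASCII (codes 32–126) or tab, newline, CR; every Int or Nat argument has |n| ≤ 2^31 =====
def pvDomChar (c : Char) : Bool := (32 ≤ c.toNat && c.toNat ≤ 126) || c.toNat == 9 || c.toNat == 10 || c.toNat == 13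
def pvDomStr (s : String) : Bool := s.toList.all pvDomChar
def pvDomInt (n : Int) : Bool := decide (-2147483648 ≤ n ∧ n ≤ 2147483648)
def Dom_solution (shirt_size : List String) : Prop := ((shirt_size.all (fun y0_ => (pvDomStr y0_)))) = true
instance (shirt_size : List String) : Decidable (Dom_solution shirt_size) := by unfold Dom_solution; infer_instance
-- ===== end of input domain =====

-- B counts the five known sizes with list.count and takes the sixth bucket as a residual (length minus the sum),
-- replacing A's per-element if-elif chain over a mutable 6-slot array. Objective: simpler.

-- ===== PORT A =====
-- answer[i] += 1 on the 6-element list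
def pvBump (answer : List Int) (i : Nat) : List Int :=
  answer.set i (answer.getD i 0 + 1)

-- the body of A's for-loop (the if-elif chain)
def pvStep (answer : List Int) (ss : String) : List Int :=
  if ss = "XS" then pvBump answer 0
  else if ss = "S" then pvBump answer 1
  else if ss = "M" then pvBump answer 2
  else if ss = "L" then pvBump answer 3
  else if ss = "XL" then pvBump answer 4
  else pvBump answer 5

def solution (shirt_size : List String) : List Int :=
  shirt_size.foldl pvStep [0, 0, 0, 0, 0, 0]

-- ===== PORT B =====
def solution_alt (shirt_size : List String) : List Int :=
  let known : List String := ["XS", "S", "M", "L", "XL"]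
  let answer : List Int := known.map (fun k => PySem.List.count shirt_size k)
  answer ++ [(shirt_size.length : Int) - answer.sum]

-- ===== PRECONDITION & SPEC =====
def Spec_solution (shirt_size : List String) (out : List Int) : Prop := out = solution_alt shirt_size
instance (shirt_size : List String) (out : List Int) : Decidable (Spec_solution shirt_size out) := by unfold Spec_solution; infer_instance

-- ===== CLAIM (what is proved, stated in full; the proofs are below) =====
def Claim_equal_solution : Prop := ∀ (shirt_size : List String), Dom_solution shirt_size → Spec_solution shirt_size (solution shirt_size)

-- ===== LEMMAS AND PROOFS =====

theorem pvStep_other (a b c d e f : Int) (x : String)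
    (h1 : x ≠ "XS") (h2 : x ≠ "S") (h3 : x ≠ "M") (h4 : x ≠ "L") (h5 : x ≠ "XL") :
    pvStep [a, b, c, d, e, f] x = [a, b, c, d, e, f + 1] := by
  simp [pvStep, pvBump, h1, h2, h3, h4, h5]

-- the fold starting from an arbitrary 6-slot state adds the five counts and the residual
theorem pv_fold_counts (l : List String) (a b c d e f : Int) :
    l.foldl pvStep [a, b, c, d, e, f]
    = [a + l.count "XS", b + l.count "S", c + l.count "M", d + l.count "L", e + l.count "XL",
       f + ((l.length : Int) - (l.count "XS" + l.count "S" + l.count "M" + l.count "L" + l.count "XL"))] := by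
  induction l generalizing a b c d e f with
  | nil => simp
  | cons x xs ih =>
    rw [List.foldl_cons]
    by_cases h1 : x = "XS"
    · rw [show pvStep [a, b, c, d, e, f] x = [a + 1, b, c, d, e, f] by simp [pvStep, pvBump, h1], ih]
      simp [h1]; omega
    · by_cases h2 : x = "S"
      · rw [show pvStep [a, b, c, d, e, f] x = [a, b + 1, c, d, e, f] by simp [pvStep, pvBump, h2], ih]
        simp [h2]; omega
      · by_cases h3 : x = "M"
        · rw [show pvStep [a, b, c, d, e, f] x = [a, b, c + 1, d, e, f] by simp [pvStep, pvBump, h3], ih]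
          simp [h3]; omega
        · by_cases h4 : x = "L"
          · rw [show pvStep [a, b, c, d, e, f] x = [a, b, c, d + 1, e, f] by simp [pvStep, pvBump, h4], ih]
            simp [h4]; omega
          · by_cases h5 : x = "XL"
            · rw [show pvStep [a, b, c, d, e, f] x = [a, b, c, d, e + 1, f] by simp [pvStep, pvBump, h5], ih]
              simp [h5]; omega
            · rw [pvStep_other a b c d e f x h1 h2 h3 h4 h5, ih]
              simp [h1, h2, h3, h4, h5]; omega

-- ===== VERDICT (by name: the statement is the Claim_ definition above) =====
theorem solution_spec : Claim_equal_solution := by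
  intro l _
  unfold Spec_solution solution solution_alt
  simp only [PySem.List.count_eq, List.map, List.sum_cons, List.sum_nil]
  rw [pv_fold_counts]
  simp; omega
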